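-- pv_equiv track=rewrite | github.com/jiesutd/YEDDA | YEDDA.py | decompositCommand
-- ===== SOURCE A (Python) =====
-- def decompositCommand(command_string):
--     command_list = []
--     each_command = []
--     num_select = ''
--     for idx in range(0, len(command_string)):
--         if command_string[idx].isdigit():
--             num_select += command_string[idx]
--         else:
--             each_command.append(num_select)
--             each_command.append(command_string[idx])
--             command_list.append(each_command)
--             each_command = []
--             num_select =''
--     # print command_list
--     return command_list
-- ===== SOURCE B (Python) =====
-- import re
--
-- def decompositCommand(command_string):
--     return [list(m) for m in re.findall(r'(\d*)(\D)', command_string)]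
-- ===== Notes on version B (the rewrite author's own statement) =====
-- stated objective: idiomatic
-- what changed: Replaces the character-by-character accumulator loop with a single regex findall of (\d*)(\D), each match yielding one [digits, command-char] pair; the trailing-digit drop and empty-string case fall out of the pattern.
import Mathlib
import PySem

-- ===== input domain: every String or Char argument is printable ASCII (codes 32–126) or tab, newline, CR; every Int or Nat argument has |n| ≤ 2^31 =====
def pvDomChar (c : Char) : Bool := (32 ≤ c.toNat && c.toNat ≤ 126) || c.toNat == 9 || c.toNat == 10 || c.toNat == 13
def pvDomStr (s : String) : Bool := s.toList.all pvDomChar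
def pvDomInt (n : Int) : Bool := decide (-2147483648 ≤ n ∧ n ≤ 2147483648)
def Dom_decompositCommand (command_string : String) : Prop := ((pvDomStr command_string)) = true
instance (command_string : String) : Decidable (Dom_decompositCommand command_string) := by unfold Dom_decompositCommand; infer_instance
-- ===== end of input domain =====

-- B replaces A's character-by-character accumulator loop with regex-style (\d*)(\D) pair matching (idiomatic).
-- On the ASCII domain Python's str.isdigit and the regex classes \d/\D coincide with Char.isDigit ('0'..'9').

-- ===== PORT A =====
-- the for-loop over command_string with state (command_list, num_select); each_command is built and
-- appended in the same step, so it is not separate state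
def pvALoop : List Char → List (List String) → List Char → List (List String)
  | [], command_list, _ => command_list
  | c :: cs, command_list, num_select =>
    if c.isDigit then
      pvALoop cs command_list (num_select ++ [c])
    else
      pvALoop cs (command_list ++ [[String.ofList num_select, String.ofList [c]]]) []

def decompositCommand (command_string : String) : List (List String) :=
  pvALoop command_string.toList [] []

-- ===== PORT B =====
-- re.findall(r'(\d*)(\D)', s): from the current position, the longest digit run, then one non-digit;
-- matching resumes after the match.  A final digit run with no following non-digit yields no match.
def pvBGo (cs : List Char) : List (List String) :=
  match h : cs.span Char.isDigit with
  | (_, []) => []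
  | (ds, c :: rest) =>
    [String.ofList ds, String.ofList [c]] :: pvBGo rest
termination_by cs.length
decreasing_by
  have h2 : c :: rest = cs.dropWhile Char.isDigit := by
    have := congrArg Prod.snd h
    simpa [List.span_eq_takeWhile_dropWhile] using this.symm
  have hle : (cs.dropWhile Char.isDigit).length ≤ cs.length := cs.length_dropWhile_le _
  rw [← h2] at hle
  simp at hle
  omega

def decompositCommand_alt (command_string : String) : List (List String) :=
  pvBGo command_string.toList

-- ===== PRECONDITION & SPEC =====
def Spec_decompositCommand (command_string : String) (out : List (List String)) : Prop := out = decompositCommand_alt command_string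
instance (command_string : String) (out : List (List String)) : Decidable (Spec_decompositCommand command_string out) := by unfold Spec_decompositCommand; infer_instance

-- ===== CLAIM (what is proved, stated in full; the proofs are below) =====
def Claim_equal_decompositCommand : Prop := ∀ (command_string : String), Dom_decompositCommand command_string → Spec_decompositCommand command_string (decompositCommand command_string)

-- ===== LEMMAS AND PROOFS =====

-- pvBGo on an all-digit list: no (\D) to match, so no pair
lemma pvBGo_all_digits (l : List Char) (hl : ∀ x ∈ l, x.isDigit) : pvBGo l = [] := by
  have hspan : l.span Char.isDigit = (l, []) := by
    simp [List.span_eq_takeWhile_dropWhile, List.takeWhile_eq_self_iff.mpr hl,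
      List.dropWhile_eq_nil_iff.mpr hl]
  rw [pvBGo]
  split
  · rfl
  · next ds c rest h' =>
    rw [hspan] at h'
    simp at h' 

-- pvBGo on digits ++ non-digit ++ rest: one pair, then recurse on rest
lemma pvBGo_cons (l : List Char) (c : Char) (r : List Char)
    (hl : ∀ x ∈ l, x.isDigit) (hc : ¬ c.isDigit) :
    pvBGo (l ++ c :: r) = [String.ofList l, String.ofList [c]] :: pvBGo r := by
  have hspan : (l ++ c :: r).span Char.isDigit = (l, c :: r) := by
    simp [List.span_eq_takeWhile_dropWhile, List.takeWhile_append,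
      List.dropWhile_append, List.takeWhile_eq_self_iff.mpr hl,
      List.dropWhile_eq_nil_iff.mpr hl, hc]
  rw [pvBGo]
  split
  · next ds h' =>
    rw [hspan] at h'
    simp at h'
  · next ds c' rest h' =>
    rw [hspan] at h'
    obtain ⟨h1, h2, h3⟩ : l = ds ∧ c = c' ∧ r = rest := by
      simpa using h'
    subst h1; subst h2; subst h3
    rfl

-- loop invariant: A's loop with pending digit run num equals acc ++ B's scan of num ++ remaining input
lemma pvALoop_eq (cs : List Char) :
    ∀ (acc : List (List String)) (num : List Char), (∀ x ∈ num, x.isDigit) →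
      pvALoop cs acc num = acc ++ pvBGo (num ++ cs) := by
  induction cs with
  | nil =>
    intro acc num hnum
    simp [pvALoop, pvBGo_all_digits num hnum]
  | cons c cs ih =>
    intro acc num hnum
    by_cases hc : c.isDigit
    · have hnum' : ∀ x ∈ num ++ [c], x.isDigit := by
        intro x hx
        rcases List.mem_append.mp hx with h | h
        · exact hnum x h
        · simpa [List.mem_singleton.mp h]
      simp only [pvALoop, hc, if_pos, ih _ _ hnum']
      simp
    · simp only [pvALoop, hc]
      rw [ih _ [] (by simp), pvBGo_cons num c cs hnum hc]
      simp

-- ===== VERDICT (by name: the statement is the Claim_ definition above) =====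
theorem decompositCommand_spec : Claim_equal_decompositCommand := by
  intro s _
  unfold Spec_decompositCommand decompositCommand decompositCommand_alt
  simpa using pvALoop_eq s.toList [] [] (by simp)
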